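-- pv_equiv track=rewrite | github.com/harshil1903/leetcode | Sort/Ex_1370/increasing_decreasing_string.py | sortString1
-- ===== SOURCE A (Python) =====
-- def sortString1(s: str) -> str:
--     res = ''
--     dic = dict()
--     lst = sorted(list(set(s)))
--     for i in lst:
--         dic[i] = s.count(i)
--     while dic:
--         tmp = lst[:]
--         for i in lst:
--             res += i
--             dic[i] -= 1
--             if dic[i] == 0:
--                 dic.pop(i)
--                 tmp.remove(i)
--         lst = tmp
--         lst.reverse()
--     return res
-- ===== SOURCE B (Python) =====
-- def sortString1(s: str) -> str:
--     cnt = {}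
--     for c in s:
--         cnt[c] = cnt.get(c, 0) + 1
--     chars = sorted(cnt)
--     m = max(cnt.values(), default=0)
--     out = []
--     for r in range(m):
--         layer = [c for c in chars if cnt[c] > r]
--         if r % 2:
--             layer.reverse()
--         out.append(''.join(layer))
--     return ''.join(out)
-- ===== Notes on version B (the rewrite author's own statement) =====
-- stated objective: alternative
-- what changed: B replaces A's destructive while-loop (decrement a dict, pop exhausted keys, rebuild and reverse the live character list each pass) with a mutation-free round-indexed loop: counts once, computes the max count m, and for round r emits the sorted characters whose count exceeds r, reversed on odd r.
import Mathlib
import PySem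

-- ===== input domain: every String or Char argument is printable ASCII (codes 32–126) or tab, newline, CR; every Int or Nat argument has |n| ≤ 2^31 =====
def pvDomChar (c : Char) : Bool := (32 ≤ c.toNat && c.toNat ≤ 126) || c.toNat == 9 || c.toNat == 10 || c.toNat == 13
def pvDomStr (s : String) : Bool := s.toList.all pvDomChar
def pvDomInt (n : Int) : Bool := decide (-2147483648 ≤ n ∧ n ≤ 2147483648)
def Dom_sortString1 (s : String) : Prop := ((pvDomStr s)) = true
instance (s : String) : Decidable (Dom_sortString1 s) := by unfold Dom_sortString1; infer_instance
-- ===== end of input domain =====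

-- B rebuilds the string round by round from a count threshold (layer r = sorted chars whose count
-- exceeds r, reversed on odd r) instead of A's mutate-a-dict-until-empty loop; objective: alternative.

-- ===== PORT A =====
-- inner 'for i in lst' loop of A; state = (res, dic, tmp).
-- 'dic[i] -= 1' and 'tmp.remove(i)' are ported with a getD fallback: on every state this loop
-- reaches, i is a key of dic and an element of tmp, so the fallbacks are never consulted.
def aInner : List Char → List Char × PySem.Dict Char Int × List Char → List Char × PySem.Dict Char Int × List Char
  | [], st => st
  | i :: rest, (res, dic, tmp) =>
      let res' := res ++ [i]
      let dic' := dic.insert i (dic.getD i 0 - 1)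
      if dic'.getD i 0 = 0 then
        aInner rest (res', dic'.erase i, (PySem.List.remove? tmp i).getD tmp)
      else
        aInner rest (res', dic', tmp)

-- 'while dic:' loop; the fuel |s| + 1 only makes the recursion structural — the loop runs at most
-- max-count ≤ |s| rounds, so the fuel is never exhausted before dic is empty.
def aLoop : Nat → List Char → PySem.Dict Char Int → List Char → List Char
  | 0, res, _, _ => res
  | fuel+1, res, dic, lst =>
      if dic.size = 0 then res
      else
        let st := aInner lst (res, dic, lst)
        aLoop fuel st.1 st.2.1 st.2.2.reverse

def sortString1 (s : String) : String :=
  let lst := PySem.List.sorted (PySem.Set.ofList s.toList) (fun c => c) false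
  let dic := lst.foldl (fun d i => d.insert i ((PySem.Chars.count s.toList [i] : Int))) PySem.Dict.empty
  String.ofList (aLoop (s.toList.length + 1) [] dic lst)

-- ===== PORT B =====
def sortString1_alt (s : String) : String :=
  let cnt := s.toList.foldl (fun d c => d.insert c (d.getD c 0 + 1)) (PySem.Dict.empty : PySem.Dict Char Int)
  let chars := PySem.List.sorted cnt.keys (fun c => c) false
  let m := PySem.List.maxD cnt.values (fun v => v) 0
  let out := (PySem.List.pyRange 0 m 1).foldl (fun acc r =>
      let layer := chars.filter (fun c => decide (r < cnt.getD c 0))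
      let layer := if PySem.Int.mod r 2 ≠ 0 then layer.reverse else layer
      acc ++ [layer]) ([] : List (List Char))
  String.ofList out.flatten

-- ===== PRECONDITION & SPEC =====
def Spec_sortString1 (s : String) (out : String) : Prop := out = sortString1_alt s
instance (s : String) (out : String) : Decidable (Spec_sortString1 s out) := by unfold Spec_sortString1; infer_instance

-- ===== CLAIM (what is proved, stated in full; the proofs are below) =====
def Claim_equal_sortString1 : Prop := ∀ (s : String), Dom_sortString1 s → Spec_sortString1 s (sortString1 s)

-- ===== LEMMAS AND PROOFS =====

-- the common model: sorted distinct characters, threshold layers, alternating direction, max count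
def mChars (t : List Char) : List Char := PySem.List.sorted (PySem.Set.ofList t) (fun c => c) false
def mF (t : List Char) (r : Nat) : List Char := (mChars t).filter (fun c => decide ((r : Int) < (t.count c : Int)))
def mdir (r : Nat) (l : List Char) : List Char := if r % 2 = 1 then l.reverse else l
def mM (t : List Char) : Nat := ((PySem.Set.ofList t).map (fun c => t.count c)).foldl max 0
def mOut (t : List Char) : List Char := ((List.range (mM t)).map (fun r => mdir r (mF t r))).flatten

-- str.count with a single-character needle is the character count
lemma count_go_singleton (c : Char) (l : List Char) : ∀ (fuel acc : Nat), l.length ≤ fuel →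
    PySem.Chars.count.go [c] fuel l acc = acc + l.count c := by
  induction l with
  | nil => intro fuel acc _; cases fuel <;> simp [PySem.Chars.count.go]
  | cons h t ih =>
    intro fuel acc hle
    cases fuel with
    | zero => simp at hle
    | succ f =>
      simp only [PySem.Chars.count.go, List.isPrefixOf, Bool.and_true, List.length_cons] at *
      by_cases hc : c == h
      · simp only [hc, if_true, List.length_nil, List.drop_succ_cons, List.drop_zero]
        rw [ih f (acc+1) (by omega)]
        have : h = c := (beq_iff_eq.mp hc).symm
        subst this
        simp
        omega
      · simp only [hc, Bool.false_eq_true, if_false]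
        rw [ih f acc (by omega)]
        have : ¬ (h = c) := fun e => by subst e; simp at hc
        simp [this]

lemma count_singleton (l : List Char) (c : Char) : PySem.Chars.count l [c] = l.count c := by
  rw [PySem.Chars.count]
  simp [count_go_singleton c l l.length 0 le_rfl]

-- dictionaries whose items are M.map (c, w c)
lemma getD_mkmap (M : List Char) (w : Char → Int) (hM : M.Nodup) {c : Char} (hc : c ∈ M) :
    (PySem.Dict.mk (M.map (fun c => (c, w c)))).getD c 0 = w c := by
  apply PySem.Dict.getD_of_mem_items
  · exact List.mem_map_of_mem hc
  · simp [PySem.Dict.keys, List.map_map, Function.comp_def, hM]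

lemma insert_mkmap (M : List Char) (w : Char → Int) {i : Char} (hi : i ∈ M) (v : Int) :
    (PySem.Dict.mk (M.map (fun c => (c, w c)))).insert i v
      = PySem.Dict.mk (M.map (fun c => (c, if c = i then v else w c))) := by
  have hcont : (PySem.Dict.mk (M.map (fun c => (c, w c)))).contains i = true := by
    rw [PySem.Dict.contains_iff_mem_keys]
    simp [PySem.Dict.keys, List.map_map, Function.comp_def, hi]
  apply PySem.Dict.ext
  rw [PySem.Dict.items_insert_of_contains _ _ hcont]
  simp only [List.map_map]
  apply List.map_congr_left
  intro c hc
  by_cases h : c = i <;> simp [h]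

lemma erase_mkmap (M : List Char) (w : Char → Int) (i : Char) :
    (PySem.Dict.mk (M.map (fun c => (c, w c)))).erase i
      = PySem.Dict.mk ((M.filter (fun c => !(c == i))).map (fun c => (c, w c))) := by
  apply PySem.Dict.ext
  simp [PySem.Dict.erase, List.filter_map, Function.comp_def]

-- list.remove on a duplicate-free list is a filter
lemma remove_nodup (tmp : List Char) (i : Char) (h : tmp.Nodup) (hi : i ∈ tmp) :
    (PySem.List.remove? tmp i).getD tmp = tmp.filter (fun c => !(c == i)) := by
  obtain ⟨k, hk⟩ := Option.isSome_iff_exists.mp (List.isSome_idxOf?.mpr hi)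
  have hidx : List.idxOf? i tmp = some (List.idxOf i tmp) := by
    rw [hk, List.idxOf_eq_getD_idxOf?, hk]; simp
  rw [PySem.List.remove?, hidx]
  simp only [Option.map_some, Option.getD_some]
  rw [List.eraseIdx_idxOf_eq_erase, List.Nodup.erase_eq_filter h]
  simp [bne]

-- one pass of A's inner loop: appends l, decrements the processed keys, drops the exhausted
-- ones from the dict and from tmp
lemma aInner_spec (l : List Char) : ∀ (res M tmp : List Char) (w : Char → Int),
    l.Nodup → M.Nodup → tmp.Nodup →
    (∀ c ∈ l, c ∈ M) → (∀ c ∈ l, c ∈ tmp) →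
    aInner l (res, ⟨M.map (fun c => (c, w c))⟩, tmp)
      = (res ++ l,
         ⟨(M.filter (fun c => !(l.contains c && w c == 1))).map
            (fun c => (c, if l.contains c then w c - 1 else w c))⟩,
         tmp.filter (fun c => !(l.contains c && w c == 1))) := by
  induction l with
  | nil =>
    intro res M tmp w _ _ _ _ _
    simp [aInner]
  | cons i rest ih =>
    intro res M tmp w hndl hndM hndtmp hsubM hsubtmp
    have hiM : i ∈ M := hsubM i (List.mem_cons_self ..)
    have hitmp : i ∈ tmp := hsubtmp i (List.mem_cons_self ..)
    have hirest : i ∉ rest := (List.nodup_cons.mp hndl).1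
    have hndrest : rest.Nodup := (List.nodup_cons.mp hndl).2
    simp only [aInner]
    rw [getD_mkmap M w hndM hiM, insert_mkmap M w hiM (w i - 1)]
    set w' : Char → Int := fun c => if c = i then w i - 1 else w c with hw'
    rw [getD_mkmap M w' hndM hiM]
    have hw'i : w' i = w i - 1 := by simp [hw']
    rw [hw'i]
    by_cases hz : w i - 1 = 0
    · rw [if_pos hz, erase_mkmap, remove_nodup tmp i hndtmp hitmp]
      have hwi1 : w i = 1 := by omega
      have hMnd' : (M.filter (fun c => !(c == i))).Nodup := List.Nodup.filter _ hndM
      have htmpnd' : (tmp.filter (fun c => !(c == i))).Nodup := List.Nodup.filter _ hndtmp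
      rw [ih (res ++ [i]) (M.filter (fun c => !(c == i))) (tmp.filter (fun c => !(c == i))) w'
            hndrest hMnd' htmpnd'
            (fun c hc => by
              simp only [List.mem_filter]
              exact ⟨hsubM c (List.mem_cons_of_mem _ hc), by
                simp; exact fun e => hirest (e ▸ hc)⟩)
            (fun c hc => by
              simp only [List.mem_filter]
              exact ⟨hsubtmp c (List.mem_cons_of_mem _ hc), by
                simp; exact fun e => hirest (e ▸ hc)⟩)]
      have hpred : ∀ (L : List Char), (L.filter (fun c => !(c == i))).filter (fun c => !(rest.contains c && w' c == 1))
          = L.filter (fun c => !((i :: rest).contains c && w c == 1)) := by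
        intro L
        rw [List.filter_filter]
        apply List.filter_congr
        intro c _
        by_cases h : c = i
        · subst h; simp [hwi1]
        · simp [h, hw']
      refine Prod.ext (by simp) (Prod.ext ?_ ?_) <;> simp only
      · congr 1
        rw [hpred M]
        apply List.map_congr_left
        intro c hc
        have hprop := (List.mem_filter.mp hc).2
        have hne : c ≠ i := by
          intro e; subst e
          simp [hwi1] at hprop
        simp [hne, hw']
      · exact hpred tmp
    · rw [if_neg hz]
      rw [ih (res ++ [i]) M tmp w' hndrest hndM hndtmp
            (fun c hc => hsubM c (List.mem_cons_of_mem _ hc))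
            (fun c hc => hsubtmp c (List.mem_cons_of_mem _ hc))]
      have hwne1 : ¬ (w i = 1) := by omega
      have hpred : ∀ (L : List Char), L.filter (fun c => !(rest.contains c && w' c == 1))
          = L.filter (fun c => !((i :: rest).contains c && w c == 1)) := by
        intro L
        apply List.filter_congr
        intro c _
        by_cases h : c = i
        · subst h
          simp [hirest, hw', hwne1]
        · simp [h, hw']
      refine Prod.ext (by simp) (Prod.ext ?_ ?_) <;> simp only
      · congr 1
        rw [hpred M]
        apply List.map_congr_left
        intro c _
        by_cases h : c = i
        · subst h
          simp [hirest, hw']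
        · simp [h, hw']
      · exact hpred tmp

-- facts about the model
lemma mdir_reverse (r : Nat) (l : List Char) : (mdir r l).reverse = mdir (r+1) l := by
  rcases Nat.mod_two_eq_zero_or_one r with h | h <;>
    simp [mdir, h, Nat.add_mod, List.reverse_reverse]

lemma mem_mdir {r : Nat} {l : List Char} {c : Char} : c ∈ mdir r l ↔ c ∈ l := by
  rcases Nat.mod_two_eq_zero_or_one r with h | h <;> simp [mdir, h]

lemma mdir_nodup {r : Nat} {l : List Char} (h : l.Nodup) : (mdir r l).Nodup := by
  rcases Nat.mod_two_eq_zero_or_one r with h' | h' <;> simp [mdir, h', h]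

lemma mdir_filter (r : Nat) (l : List Char) (p : Char → Bool) :
    (mdir r l).filter p = mdir r (l.filter p) := by
  rcases Nat.mod_two_eq_zero_or_one r with h | h <;> simp [mdir, h, List.filter_reverse]

lemma step_pred (r : Nat) : ∀ n : Nat,
    (!((n : Int) - (r : Int) == 1) && decide ((r : Int) < (n : Int))) = decide (((r+1 : Nat) : Int) < (n : Int)) := by
  intro n
  rw [Bool.eq_iff_iff]
  simp only [Bool.and_eq_true, decide_eq_true_iff, Bool.not_eq_eq_eq_not, Bool.not_true,
    beq_eq_false_iff_ne, ne_eq]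
  push_cast
  omega

lemma mF_succ (t : List Char) (r : Nat) :
    (mF t r).filter (fun c => !((t.count c : Int) - (r : Int) == 1)) = mF t (r+1) := by
  rw [mF, List.filter_filter, mF]
  apply List.filter_congr
  intro c _
  exact step_pred r (t.count c)

lemma mChars_nodup (t : List Char) : (mChars t).Nodup := by
  have hp := PySem.List.sorted_perm (PySem.Set.ofList t) (fun c : Char => c) false
  exact hp.symm.nodup (PySem.Set.nodup_ofList t)

lemma mem_mChars {t : List Char} {c : Char} : c ∈ mChars t ↔ c ∈ t := by
  rw [mChars, PySem.List.mem_sorted, PySem.Set.mem_ofList]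

lemma foldl_max_le_iff (l : List Nat) : ∀ (a r : Nat), l.foldl max a ≤ r ↔ a ≤ r ∧ ∀ x ∈ l, x ≤ r := by
  induction l with
  | nil => simp
  | cons h t ih =>
    intro a r
    simp only [List.foldl_cons, ih, List.mem_cons]
    constructor
    · rintro ⟨h1, h2⟩
      exact ⟨le_trans (le_max_left _ _) h1, fun x hx => hx.elim (fun e => e ▸ le_trans (le_max_right _ _) h1) (h2 x)⟩
    · rintro ⟨h1, h2⟩
      exact ⟨max_le h1 (h2 h (Or.inl rfl)), fun x hx => h2 x (Or.inr hx)⟩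

lemma mM_le_iff (t : List Char) (r : Nat) : mM t ≤ r ↔ ∀ c ∈ t, t.count c ≤ r := by
  rw [mM, foldl_max_le_iff]
  simp [PySem.Set.mem_ofList]

lemma mF_eq_nil_iff (t : List Char) (r : Nat) : mF t r = [] ↔ mM t ≤ r := by
  rw [mF, List.filter_eq_nil_iff, mM_le_iff]
  constructor
  · intro h c hc
    have := h c (mem_mChars.mpr hc)
    simp at this
    exact_mod_cast this
  · intro h c hc
    have := h c (mem_mChars.mp hc)
    simp
    exact_mod_cast this

lemma mF_nodup (t : List Char) (r : Nat) : (mF t r).Nodup := List.Nodup.filter _ (mChars_nodup t)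

-- A's while loop, started at round r with enough fuel, emits the remaining layers
lemma aLoop_spec (t : List Char) : ∀ (fuel r : Nat) (res : List Char), mM t ≤ r + fuel →
    aLoop fuel res ⟨(mF t r).map (fun c => (c, (t.count c : Int) - r))⟩ (mdir r (mF t r))
      = res ++ ((List.range' r (mM t - r)).map (fun j => mdir j (mF t j))).flatten := by
  intro fuel
  induction fuel with
  | zero =>
    intro r res hle
    have : mM t - r = 0 := by omega
    simp [aLoop, this]
  | succ f ih =>
    intro r res hle
    rw [aLoop]
    by_cases hsz : (PySem.Dict.mk ((mF t r).map (fun c => (c, (t.count c : Int) - (r : Int))))).size = 0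
    · have hnil : mF t r = [] := by
        rwa [PySem.Dict.size, List.length_map, List.length_eq_zero_iff] at hsz
      have : mM t - r = 0 := by
        have := (mF_eq_nil_iff t r).mp hnil; omega
      simp [hsz, this]
    · rw [if_neg hsz]
      have hnil : mF t r ≠ [] := by
        intro h
        exact hsz (by simp [PySem.Dict.size, h])
      have hrlt : r < mM t := by
        by_contra hge
        exact hnil ((mF_eq_nil_iff t r).mpr (by omega))
      have hnd := mF_nodup t r
      have hdirnd := mdir_nodup (r := r) hnd
      rw [aInner_spec (mdir r (mF t r)) res (mF t r) (mdir r (mF t r))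
            (fun c => (t.count c : Int) - r) hdirnd hnd hdirnd
            (fun c hc => mem_mdir.mp hc) (fun c hc => hc)]
      simp only
      have hcontains : ∀ c ∈ mF t r, (mdir r (mF t r)).contains c = true := by
        intro c hc
        simpa [List.contains_iff_mem] using mem_mdir.mpr hc
      have hfilt : (mF t r).filter (fun c => !((mdir r (mF t r)).contains c && (t.count c : Int) - r == 1))
          = mF t (r+1) := by
        rw [← mF_succ t r]
        apply List.filter_congr
        intro c hc
        rw [hcontains c hc]
        simp
      have hdict : ((mF t r).filter (fun c => !((mdir r (mF t r)).contains c && (t.count c : Int) - r == 1))).map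
            (fun c => (c, if (mdir r (mF t r)).contains c then (t.count c : Int) - r - 1 else (t.count c : Int) - r))
          = (mF t (r+1)).map (fun c => (c, (t.count c : Int) - ((r+1 : Nat) : Int))) := by
        rw [hfilt]
        apply List.map_congr_left
        intro c hc
        have hcF : c ∈ mF t r := by
          rw [← mF_succ t r] at hc
          exact (List.mem_filter.mp hc).1
        have := hcontains c hcF
        simp only [this, if_true]
        push_cast
        ring_nf
      have htmp : ((mdir r (mF t r)).filter (fun c => !((mdir r (mF t r)).contains c && (t.count c : Int) - r == 1))).reverse
          = mdir (r+1) (mF t (r+1)) := by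
        rw [mdir_filter]
        have : (mF t r).filter (fun c => !((mdir r (mF t r)).contains c && (t.count c : Int) - r == 1)) = mF t (r+1) := hfilt
        rw [this, mdir_reverse]
      rw [hdict, htmp]
      rw [ih (r+1) (res ++ mdir r (mF t r)) (by omega)]
      have hrange : List.range' r (mM t - r) = r :: List.range' (r+1) (mM t - (r+1)) := by
        have : mM t - r = (mM t - (r+1)) + 1 := by omega
        rw [this, List.range'_succ]
      rw [hrange]
      simp

lemma mF_zero (t : List Char) : mF t 0 = mChars t := by
  rw [mF, List.filter_eq_self]
  intro c hc
  simp [List.count_pos_iff]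
  exact mem_mChars.mp hc

lemma foldl_max_cast (l : List Nat) : ∀ a : Nat, List.foldl max ((a : Nat) : Int) (List.map (Nat.cast : Nat → Int) l) = ((l.foldl max a : Nat) : Int) := by
  induction l with
  | nil => intro a; simp
  | cons h tl ih =>
    intro a
    rw [List.map_cons, List.foldl_cons, List.foldl_cons, ← Nat.cast_max, ih]

lemma portA_eq_mOut (s : String) : sortString1 s = String.ofList (mOut s.toList) := by
  rw [sortString1]
  set t := s.toList with ht
  have hnd := mChars_nodup t
  have hdic : (mChars t).foldl (fun d i => d.insert i ((PySem.Chars.count t [i] : Int))) PySem.Dict.empty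
      = PySem.Dict.mk ((mF t 0).map (fun c => (c, (t.count c : Int) - (0 : Nat)))) := by
    apply PySem.Dict.ext
    rw [PySem.Dict.items_foldl_insert_fresh (mChars t) (fun c => c)
          (fun c => ((PySem.Chars.count t [c] : Nat) : Int)) PySem.Dict.empty
          (by intro a _; simp [PySem.Dict.contains_empty]) (by simpa using hnd)]
    simp only [PySem.Dict.empty, List.nil_append, mF_zero]
    apply List.map_congr_left
    intro c _
    simp [count_singleton]
  rw [← mChars] at *
  rw [hdic]
  have h0 : mChars t = mdir 0 (mF t 0) := by simp [mdir, mF_zero]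
  rw [h0]  -- rewrites lst argument
  rw [aLoop_spec t (t.length + 1) 0 [] ?hfuel]
  · simp only [Nat.sub_zero, List.nil_append]
    rw [mOut, List.range_eq_range']
  case hfuel =>
    have : mM t ≤ t.length := by
      rw [mM_le_iff]
      intro c _
      exact List.count_le_length
    omega

lemma portB_eq_mOut (s : String) : sortString1_alt s = String.ofList (mOut s.toList) := by
  rw [sortString1_alt]
  set t := s.toList with ht
  rw [PySem.Dict.foldl_insert_getD_add_one_eq_counter t, PySem.Dict.keys_counter t, ← mChars]
  have hvalues : (PySem.Dict.counter t).values
      = List.map (Nat.cast : Nat → Int) ((PySem.Set.ofList t).map (fun c => t.count c)) := by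
    rw [PySem.Dict.values, PySem.Dict.items_counter, List.map_map, List.map_map]
    rfl
  have hm : PySem.List.maxD (PySem.Dict.counter t).values (fun v => v) 0 = ((mM t : Nat) : Int) := by
    rw [PySem.List.maxD, hvalues]
    cases hS : PySem.Set.ofList t with
    | nil =>
      rw [mM, hS]
      simp [PySem.List.max?]
    | cons c0 cs =>
      rw [List.map_cons, List.map_cons, PySem.List.max?_id_cons]
      simp only [Option.getD_some]
      rw [foldl_max_cast, mM, hS, List.map_cons, List.foldl_cons]
      simp
  rw [hm]
  rw [PySem.List.foldl_append_singleton_eq_map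
        (f := fun r => if PySem.Int.mod r 2 ≠ 0 then
            ((mChars t).filter (fun c => decide (r < (PySem.Dict.counter t).getD c 0))).reverse
          else (mChars t).filter (fun c => decide (r < (PySem.Dict.counter t).getD c 0)))]
  rw [PySem.List.pyRange_one, List.map_map]
  have htoNat : (((mM t : Nat) : Int) - 0).toNat = mM t := by simp
  rw [htoNat]
  have hmap : ∀ r : Nat,
      (if PySem.Int.mod ((0 : Int) + (r : Nat)) 2 ≠ 0 then
          ((mChars t).filter (fun c => decide ((0 : Int) + (r : Nat) < (PySem.Dict.counter t).getD c 0))).reverse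
        else (mChars t).filter (fun c => decide ((0 : Int) + (r : Nat) < (PySem.Dict.counter t).getD c 0)))
      = mdir r (mF t r) := by
    intro r
    have hlayer : (mChars t).filter (fun c => decide ((0 : Int) + (r : Nat) < (PySem.Dict.counter t).getD c 0)) = mF t r := by
      rw [mF]
      apply List.filter_congr
      intro c _
      rw [PySem.Dict.getD_counter t c]
      simp
    rw [hlayer]
    have hmod : PySem.Int.mod ((0 : Int) + (r : Nat)) 2 = ((r % 2 : Nat) : Int) := by
      rw [zero_add]
      exact_mod_cast PySem.Int.mod_natCast r 2
    rw [hmod]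
    rcases Nat.mod_two_eq_zero_or_one r with h | h <;> simp [mdir, h]
  simp only [Function.comp_def, hmap]
  rw [mOut]
  simp

-- ===== VERDICT (by name: the statement is the Claim_ definition above) =====
theorem sortString1_spec : Claim_equal_sortString1 := by
  intro s _
  unfold Spec_sortString1
  rw [portA_eq_mOut, portB_eq_mOut]
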